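-- pv_equiv track=rewrite | github.com/gssrenathkumar/resume_builder | all_functions.py | remove_asterisks
-- ===== SOURCE A (Python) =====
-- def remove_asterisks(text):
--     lines = text.split('\n')
--     cleaned_lines = []
--     for line in lines:
--         if line.startswith('*'):
--             line = line[1:]  # Remove the asterisk at the beginning of the line
--         cleaned_lines.append(line)
--     cleaned_text = '\n'.join(cleaned_lines)
--     return cleaned_text
-- ===== SOURCE B (Python) =====
-- import re
--
-- _LEADING_STAR = re.compile(r'(?m)^\*')
--
-- def remove_asterisks(text):
--     # One multiline regex pass: delete a single '*' at the start of every line.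
--     return _LEADING_STAR.sub('', text)
-- ===== Notes on version B (the rewrite author's own statement) =====
-- stated objective: idiomatic
-- what changed: Replaced the split('\n')/loop/guard/join pipeline with a single multiline regex substitution re.sub(r'(?m)^\*', '', text) that strips one leading asterisk per line in one scan.
import Mathlib
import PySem

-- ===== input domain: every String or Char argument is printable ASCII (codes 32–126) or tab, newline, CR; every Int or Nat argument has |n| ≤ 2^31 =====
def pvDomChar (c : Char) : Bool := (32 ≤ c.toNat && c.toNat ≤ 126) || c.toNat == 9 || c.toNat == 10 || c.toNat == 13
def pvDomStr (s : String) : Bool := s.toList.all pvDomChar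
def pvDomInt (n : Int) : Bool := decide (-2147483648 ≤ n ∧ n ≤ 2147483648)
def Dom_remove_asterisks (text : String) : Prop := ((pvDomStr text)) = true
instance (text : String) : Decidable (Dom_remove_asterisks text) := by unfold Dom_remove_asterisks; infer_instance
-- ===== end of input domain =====

-- B replaces A's split('\n')/loop/guard/join pipeline by one multiline-regex-style scan
-- (re.sub(r'(?m)^\*', '', text)) that deletes a single '*' at each line start; objective: idiomatic one-pass rewrite.

-- ===== PORT A =====
def remove_asterisks (text : String) : String :=
  -- lines = text.split('\n')  (sep "\n" ≠ "", so split? is always `some`)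
  let lines : List String := (PySem.Str.split? text "\n").getD []
  -- for line in lines: if line.startswith('*'): line = line[1:]; cleaned_lines.append(line)
  let cleaned_lines : List String :=
    lines.foldl (fun acc line =>
      let line := if PySem.Str.startswith line "*" then PySem.Str.slice line (some 1) none else line
      acc ++ [line]) []
  -- '\n'.join(cleaned_lines)
  PySem.Str.join "\n" cleaned_lines

-- ===== PORT B =====
-- Hand port of re.sub(r'(?m)^\*', '', text): the regex engine makes one left-to-right scan,
-- deleting '*' exactly when it stands at a line start (string start or just after '\n');
-- exact on all inputs, since the pattern is a single literal character anchored by (?m)^.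
def reSubLeadingStar (atLineStart : Bool) : List Char → List Char
  | [] => []
  | c :: rest =>
    if atLineStart && c == '*' then reSubLeadingStar false rest
    else c :: reSubLeadingStar (c == '\n') rest

def remove_asterisks_alt (text : String) : String :=
  String.ofList (reSubLeadingStar true text.toList)

-- ===== PRECONDITION & SPEC =====
def Spec_remove_asterisks (text : String) (out : String) : Prop := out = remove_asterisks_alt text
instance (text : String) (out : String) : Decidable (Spec_remove_asterisks text out) := by unfold Spec_remove_asterisks; infer_instance

-- ===== CLAIM (what is proved, stated in full; the proofs are below) =====
def Claim_equal_remove_asterisks : Prop := ∀ (text : String), Dom_remove_asterisks text → Spec_remove_asterisks text (remove_asterisks text)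

-- ===== LEMMAS AND PROOFS =====

-- Simple recursive characterisation of Chars.splitOn · ['\n'].
def splitNL : List Char → List (List Char)
  | [] => [[]]
  | c :: cs =>
    if c = '\n' then [] :: splitNL cs
    else
      match splitNL cs with
      | [] => [[c]]          -- unreachable: splitNL is never []
      | y :: ys => (c :: y) :: ys

theorem splitNL_ne_nil (cs : List Char) : splitNL cs ≠ [] := by
  cases cs with
  | nil => simp [splitNL]
  | cons c cs =>
    simp only [splitNL]
    split
    · simp
    · split <;> simp

-- prepend a prefix to the head of a split
def modHead (p : List Char) : List (List Char) → List (List Char)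
  | [] => [p]
  | y :: ys => (p ++ y) :: ys

theorem go_spec (fuel : Nat) : ∀ (l cur : List Char) (acc : List (List Char)),
    l.length < fuel →
    PySem.Chars.splitOn.go ['\n'] fuel l cur acc
      = acc.reverse ++ modHead cur.reverse (splitNL l) := by
  induction fuel with
  | zero => intro l cur acc h; omega
  | succ n ih =>
    intro l cur acc h
    cases l with
    | nil =>
      simp [PySem.Chars.splitOn.go, splitNL, modHead]
    | cons c rest =>
      by_cases hc : c = '\n'
      · subst hc
        have hpre : List.isPrefixOf ['\n'] ('\n' :: rest) = true := by
          simp [List.isPrefixOf]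
        rw [show PySem.Chars.splitOn.go ['\n'] (n+1) ('\n' :: rest) cur acc
              = PySem.Chars.splitOn.go ['\n'] n (List.drop 1 ('\n' :: rest)) [] (cur.reverse :: acc) by
              simp [PySem.Chars.splitOn.go, hpre]]
        rw [ih _ _ _ (by simpa using Nat.lt_of_succ_lt_succ h)]
        simp only [List.drop_succ_cons, List.drop_zero, List.reverse_cons, List.reverse_nil,
          List.append_assoc, List.singleton_append]
        have : modHead [] (splitNL rest) = splitNL rest := by
          cases hs : splitNL rest with
          | nil => exact absurd hs (splitNL_ne_nil rest)
          | cons y ys => simp [modHead]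
        rw [this]
        simp [splitNL, modHead]
      · have hpre : List.isPrefixOf ['\n'] (c :: rest) = false := by
          simp [List.isPrefixOf]; exact fun hh => hc hh.symm
        rw [show PySem.Chars.splitOn.go ['\n'] (n+1) (c :: rest) cur acc
              = PySem.Chars.splitOn.go ['\n'] n rest (c :: cur) acc by
              simp [PySem.Chars.splitOn.go, hpre]]
        rw [ih _ _ _ (by simpa using Nat.lt_of_succ_lt_succ h)]
        cases hs : splitNL rest with
        | nil => exact absurd hs (splitNL_ne_nil rest)
        | cons y ys =>
          simp [splitNL, hc, hs, modHead]

theorem splitOn_eq_splitNL (cs : List Char) :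
    PySem.Chars.splitOn cs ['\n'] = splitNL cs := by
  unfold PySem.Chars.splitOn
  rw [go_spec (cs.length + 1) cs [] [] (by omega)]
  cases hs : splitNL cs with
  | nil => exact absurd hs (splitNL_ne_nil cs)
  | cons y ys => simp [modHead]

-- the per-line transformation A applies
def stripStar (l : List Char) : List Char :=
  if PySem.Chars.startswith l ['*'] then PySem.Chars.slice l (some 1) none else l

theorem stripStar_nil : stripStar [] = [] := by decide

theorem stripStar_cons (c : Char) (l : List Char) :
    stripStar (c :: l) = if c = '*' then l else c :: l := by
  by_cases h : c = '*'
  · subst h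
    simp only [stripStar, PySem.Chars.startswith, List.isPrefixOf]
    simp only [beq_self_eq_true, Bool.true_and, if_true,
      PySem.Chars.slice_eq_listSlice]
    rw [PySem.List.slice_from _ (by norm_num)]
    simp
  · have hsw : PySem.Chars.startswith (c :: l) ['*'] = false := by
      simp [PySem.Chars.startswith, List.isPrefixOf]
      exact fun hh => h hh.symm
    simp [stripStar, hsw, h]

theorem join_nil_cons (z : List Char) (zs : List (List Char)) :
    PySem.Chars.join ['\n'] ([] :: z :: zs) = '\n' :: PySem.Chars.join ['\n'] (z :: zs) := by
  simpa using PySem.Chars.join_cons_cons ['\n'] [] z zs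

theorem join_head_cons (c : Char) (z : List Char) (zs : List (List Char)) :
    PySem.Chars.join ['\n'] ((c :: z) :: zs) = c :: PySem.Chars.join ['\n'] (z :: zs) := by
  cases zs with
  | nil => simp
  | cons w ws =>
    rw [PySem.Chars.join_cons_cons, PySem.Chars.join_cons_cons]
    simp

-- apply f to every element, or to every element but the head
def mapHd : Bool → (List Char → List Char) → List (List Char) → List (List Char)
  | _, _, [] => []
  | true, f, y :: ys => f y :: ys.map f
  | false, f, y :: ys => y :: ys.map f

theorem join_mapHd_eq_reSub (cs : List Char) (b : Bool) :
    PySem.Chars.join ['\n'] (mapHd b stripStar (splitNL cs)) = reSubLeadingStar b cs := by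
  induction cs generalizing b with
  | nil =>
    cases b <;> simp [splitNL, mapHd, stripStar_nil, reSubLeadingStar]
  | cons c cs ih =>
    obtain ⟨y, ys, hs⟩ : ∃ y ys, splitNL cs = y :: ys := by
      cases h : splitNL cs with
      | nil => exact absurd h (splitNL_ne_nil cs)
      | cons y ys => exact ⟨y, ys, rfl⟩
    have ihT := ih true
    have ihF := ih false
    rw [hs] at ihT ihF
    simp only [mapHd] at ihT ihF
    by_cases hc : c = '\n'
    · subst hc
      have hsplit : splitNL ('\n' :: cs) = [] :: y :: ys := by simp [splitNL, hs]
      rw [hsplit]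
      cases b with
      | true =>
        simp only [mapHd, stripStar_nil, List.map_cons]
        rw [join_nil_cons, ihT]
        simp [reSubLeadingStar]
      | false =>
        simp only [mapHd, List.map_cons]
        rw [join_nil_cons, ihT]
        simp [reSubLeadingStar]
    · have hsplit : splitNL (c :: cs) = (c :: y) :: ys := by simp [splitNL, hc, hs]
      rw [hsplit]
      cases b with
      | true =>
        simp only [mapHd, stripStar_cons]
        by_cases hstar : c = '*'
        · subst hstar
          rw [if_pos rfl, ihF]
          simp [reSubLeadingStar]
        · rw [if_neg hstar, join_head_cons, ihF]
          simp only [reSubLeadingStar, Bool.true_and]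
          rw [show (c == '*') = false from by simp [hstar],
              show (c == '\n') = false from by simp [hc]]
          simp
      | false =>
        simp only [mapHd]
        rw [join_head_cons, ihF]
        simp only [reSubLeadingStar, Bool.false_and]
        rw [show (c == '\n') = false from by simp [hc]]
        simp

-- foldl-append builds the map
theorem foldl_push (f : String → String) (l : List String) (acc : List String) :
    l.foldl (fun a x => a ++ [f x]) acc = acc ++ l.map f := by
  induction l generalizing acc with
  | nil => simp
  | cons x xs ih => simp [ih]

-- ===== VERDICT (by name: the statement is the Claim_ definition above) =====
theorem remove_asterisks_spec : Claim_equal_remove_asterisks := by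
  intro text _
  unfold Spec_remove_asterisks remove_asterisks remove_asterisks_alt
  obtain ⟨L, hL, hLchars⟩ : ∃ L, PySem.Str.split? text "\n" = some L ∧
      L.map String.toList = splitNL text.toList := by
    have h := PySem.Str.split?_map text "\n"
    rw [show ("\n".toList) = ['\n'] from rfl,
        show PySem.Chars.split? text.toList ['\n']
          = some (PySem.Chars.splitOn text.toList ['\n']) from by simp [PySem.Chars.split?]] at h
    cases hsp : PySem.Str.split? text "\n" with
    | none => rw [hsp] at h; simp at h
    | some L =>
      rw [hsp] at h
      simp only [Option.map_some, Option.some.injEq] at h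
      exact ⟨L, rfl, by rw [h, splitOn_eq_splitNL]⟩
  simp only [hL, Option.getD_some]
  rw [foldl_push (fun line => if PySem.Str.startswith line "*" then PySem.Str.slice line (some 1) none else line)]
  rw [← String.toList_inj, PySem.Str.toList_join, String.toList_ofList, List.nil_append]
  have hmap : List.map String.toList
      (List.map (fun line => if PySem.Str.startswith line "*" then PySem.Str.slice line (some 1) none else line) L)
      = (L.map String.toList).map stripStar := by
    rw [List.map_map, List.map_map]
    apply List.map_congr_left
    intro l _
    simp [Function.comp, stripStar, PySem.Str.startswith_eq, apply_ite String.toList,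
      PySem.Str.toList_slice]
  rw [hmap, hLchars]
  obtain ⟨y, ys, hs⟩ : ∃ y ys, splitNL text.toList = y :: ys := by
    cases h : splitNL text.toList with
    | nil => exact absurd h (splitNL_ne_nil _)
    | cons y ys => exact ⟨y, ys, rfl⟩
  rw [hs, show (y :: ys).map stripStar = mapHd true stripStar (y :: ys) from rfl, ← hs,
      join_mapHd_eq_reSub, String.toList_ofList]
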